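-- pv_equiv track=rewrite | github.com/TaterTotterson/Tater_Shop | cores/ai_task_core.py | _ai_tasks_kernel_token_set
-- ===== SOURCE A (Python) =====
-- from typing import Any, Dict, List, Optional, Tuple
--
-- def _ai_tasks_kernel_token_set(raw_text: Any) -> set[str]:
--     text = str(raw_text or "").strip().lower()
--     if not text:
--         return set()
--     tokens: List[str] = []
--     current: List[str] = []
--     for ch in text:
--         if ch.isalnum():
--             current.append(ch)
--             continue
--         if current:
--             tokens.append("".join(current))
--             current = []
--     if current:
--         tokens.append("".join(current))
--     return set(tokens)
-- ===== SOURCE B (Python) =====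
-- from typing import Any
--
--
-- def _ai_tasks_kernel_token_set(raw_text: Any) -> set[str]:
--     text = str(raw_text or "").strip().lower()
--     masked = "".join(ch if ch.isalnum() else " " for ch in text)
--     return set(masked.split())
-- ===== Notes on version B (the rewrite author's own statement) =====
-- stated objective: idiomatic
-- what changed: Replaced the character-by-character buffer state machine (explicit current/tokens accumulators with boundary flushes) by a mask-then-split decomposition: non-alnum chars become spaces and str.split() does the tokenizing.
import Mathlib
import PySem

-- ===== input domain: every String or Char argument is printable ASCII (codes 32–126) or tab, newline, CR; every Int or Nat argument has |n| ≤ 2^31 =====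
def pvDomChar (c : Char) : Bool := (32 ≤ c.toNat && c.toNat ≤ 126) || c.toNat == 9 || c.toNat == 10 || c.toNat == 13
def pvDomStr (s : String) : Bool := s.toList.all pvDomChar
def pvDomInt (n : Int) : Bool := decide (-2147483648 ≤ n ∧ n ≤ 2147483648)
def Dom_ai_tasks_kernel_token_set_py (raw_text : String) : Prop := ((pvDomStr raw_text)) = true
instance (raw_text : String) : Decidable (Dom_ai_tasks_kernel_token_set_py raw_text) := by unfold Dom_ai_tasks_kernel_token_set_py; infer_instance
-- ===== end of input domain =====

-- B replaces A's character-by-character buffer state machine by mask-then-split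
-- (non-alnum chars become spaces, then str.split() tokenizes); objective: more idiomatic.

-- ===== PORT A =====
-- one loop step of A's for-loop: state = (tokens, current)
def tsStep (st : List String × List Char) (ch : Char) : List String × List Char :=
  if PySem.Chars.isalnum ch then (st.1, st.2 ++ [ch])
  else if st.2 ≠ [] then (st.1 ++ [String.ofList st.2], [])
  else st

-- the flush after the loop ('if current: tokens.append(...)')
def tsFinish (st : List String × List Char) : List String :=
  if st.2 ≠ [] then st.1 ++ [String.ofList st.2] else st.1

def ai_tasks_kernel_token_set_py (raw_text : String) : List String :=
  -- str(raw_text or "") on a str argument is the identity (falsy str = "")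
  let text := PySem.Str.lower (PySem.Str.strip raw_text)
  if text = "" then []
  else PySem.Set.ofList (tsFinish (text.toList.foldl tsStep ([], [])))

-- ===== PORT B =====
def ai_tasks_kernel_token_set_py_alt (raw_text : String) : List String :=
  let text := PySem.Str.lower (PySem.Str.strip raw_text)
  let masked := String.ofList (text.toList.map (fun ch => if PySem.Chars.isalnum ch then ch else ' '))
  PySem.Set.ofList (PySem.Str.split₀ masked)

-- ===== PRECONDITION & SPEC =====
def Spec_ai_tasks_kernel_token_set_py (raw_text : String) (out : List String) : Prop := out = ai_tasks_kernel_token_set_py_alt raw_text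
instance (raw_text : String) (out : List String) : Decidable (Spec_ai_tasks_kernel_token_set_py raw_text out) := by unfold Spec_ai_tasks_kernel_token_set_py; infer_instance

-- ===== CLAIM (what is proved, stated in full; the proofs are below) =====
def Claim_equal_ai_tasks_kernel_token_set_py : Prop := ∀ (raw_text : String), Dom_ai_tasks_kernel_token_set_py raw_text → Spec_ai_tasks_kernel_token_set_py raw_text (ai_tasks_kernel_token_set_py raw_text)

-- ===== LEMMAS AND PROOFS =====

theorem isalnum_not_isspace (c : Char) (h : PySem.Chars.isalnum c = true) :
    PySem.Chars.isspace c = false := by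
  simp only [PySem.Chars.isalnum, PySem.Chars.isalpha, PySem.Chars.isupper, PySem.Chars.islower,
    PySem.Chars.isdigit, Bool.or_eq_true, Bool.and_eq_true, decide_eq_true_eq, Char.le_def] at h
  simp only [PySem.Chars.isspace, Bool.or_eq_false_iff, Bool.and_eq_false_iff,
    decide_eq_false_iff_not, Char.toNat]
  rcases h with (⟨h1, h2⟩ | ⟨h1, h2⟩) | ⟨h1, h2⟩ <;>
    rw [UInt32.le_iff_toNat_le] at h1 h2 <;>
    [(have a1 : (65:Nat) ≤ c.val.toNat := h1; have a2 : c.val.toNat ≤ 90 := h2);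
     (have a1 : (97:Nat) ≤ c.val.toNat := h1; have a2 : c.val.toNat ≤ 122 := h2);
     (have a1 : (48:Nat) ≤ c.val.toNat := h1; have a2 : c.val.toNat ≤ 57 := h2)] <;>
    omega

theorem isspace_space : PySem.Chars.isspace ' ' = true := by decide

-- the accumulator of Chars.split₀.go only collects finished words in reverse
theorem go_acc (s cur : List Char) (acc : List (List Char)) :
    PySem.Chars.split₀.go s cur acc = acc.reverse ++ PySem.Chars.split₀.go s cur [] := by
  induction s generalizing cur acc with
  | nil =>
    simp only [PySem.Chars.split₀.go]
    by_cases h : cur.isEmpty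
    · simp [h]
    · simp [h]
  | cons c rest ih =>
    simp only [PySem.Chars.split₀.go]
    by_cases hs : PySem.Chars.isspace c
    · by_cases hc : cur.isEmpty
      · simp only [hs, hc, if_true]
        exact ih [] acc
      · simp only [hs, hc, if_true]
        rw [ih [] (cur.reverse :: acc), ih [] [cur.reverse]]
        simp
    · simp only [hs]
      exact ih (c :: cur) acc

-- A's loop + final flush computes exactly split₀ of the masked characters
theorem loop_eq_go (cs : List Char) (tokens : List String) (cur : List Char) :
    tsFinish (cs.foldl tsStep (tokens, cur)) =
    tokens ++ (PySem.Chars.split₀.go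
        (cs.map (fun ch => if PySem.Chars.isalnum ch then ch else ' '))
        cur.reverse []).map String.ofList := by
  induction cs generalizing tokens cur with
  | nil =>
    simp only [List.foldl_nil, List.map_nil, PySem.Chars.split₀.go, tsFinish]
    by_cases h : cur = []
    · simp [h]
    · simp [h, List.isEmpty_eq_false_iff.mpr (by simpa using h : cur.reverse ≠ [])]
  | cons c rest ih =>
    simp only [List.foldl_cons, List.map_cons]
    cases ha : PySem.Chars.isalnum c with
    | true =>
      have hns := isalnum_not_isspace c ha
      simp only [tsStep, ha, if_true]
      rw [ih tokens (cur ++ [c])]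
      simp only [PySem.Chars.split₀.go, hns]
      simp
    | false =>
      by_cases hc : cur = []
      · subst hc
        simp only [tsStep, ha, Bool.false_eq_true, if_false, ne_eq, not_true_eq_false,
          List.reverse_nil]
        rw [ih tokens []]
        simp [PySem.Chars.split₀.go, isspace_space]
      · simp only [tsStep, ha, Bool.false_eq_true, if_false, ne_eq, hc, not_false_eq_true, if_true]
        rw [ih (tokens ++ [String.ofList cur]) []]
        simp only [PySem.Chars.split₀.go, isspace_space, if_true,
          List.isEmpty_eq_false_iff.mpr (by simpa using hc : cur.reverse ≠ []), Bool.false_eq_true,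
          if_false, List.reverse_reverse]
        rw [go_acc _ [] [cur]]
        simp

-- ===== VERDICT (by name: the statement is the Claim_ definition above) =====
theorem ai_tasks_kernel_token_set_py_spec : Claim_equal_ai_tasks_kernel_token_set_py := by
  intro raw_text _
  unfold Spec_ai_tasks_kernel_token_set_py
  simp only [ai_tasks_kernel_token_set_py, ai_tasks_kernel_token_set_py_alt]
  by_cases h : PySem.Str.lower (PySem.Str.strip raw_text) = ""
  · rw [if_pos h, h]
    rfl
  · rw [if_neg h]
    have key := loop_eq_go (PySem.Str.lower (PySem.Str.strip raw_text)).toList [] []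
    simp only [List.reverse_nil, List.nil_append] at key
    rw [key, PySem.Str.split₀]
    simp only [String.toList_ofList]
    rfl
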